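-- pv_equiv track=rewrite | github.com/Najmul-Huda70/Python-Najmul-Huda | July-2025/B_Tenzing_and_Books.py | make_prefix_array
-- ===== SOURCE A (Python) =====
-- def make_prefix_array(arr):
--     s=0
--     newArray=[]
--     newArray.append(s)
--     for num in arr:
--         if (s|num) !=s:
--             s|=num
--             newArray.append(s)
--     return newArray
-- ===== SOURCE B (Python) =====
-- def make_prefix_array(arr):
--     # Divide and conquer: the deduplicated prefix-OR list of a segment is the
--     # left half's list followed by the right half's list, each value OR-ed with
--     # the left half's total and compressed against the running last value.
--     def solve(seg):
--         if len(seg) <= 1: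
--             return [0, seg[0]] if seg and seg[0] != 0 else [0]
--         mid = len(seg) // 2
--         left = solve(seg[:mid])
--         right = solve(seg[mid:])
--         out = left[:]
--         t = left[-1]
--         for v in right:
--             c = t | v
--             if c != out[-1]:
--                 out.append(c)
--         return out
--     return solve(arr)
-- ===== Notes on version B (the rewrite author's own statement) =====
-- stated objective: alternative
-- what changed: A's single left-to-right scan that conditionally appends the running OR is replaced by a divide-and-conquer: recursively solve each half of the list, then append the right half's result, each value OR-ed with the left half's total, compressed against the running last value.
import Mathlib
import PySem

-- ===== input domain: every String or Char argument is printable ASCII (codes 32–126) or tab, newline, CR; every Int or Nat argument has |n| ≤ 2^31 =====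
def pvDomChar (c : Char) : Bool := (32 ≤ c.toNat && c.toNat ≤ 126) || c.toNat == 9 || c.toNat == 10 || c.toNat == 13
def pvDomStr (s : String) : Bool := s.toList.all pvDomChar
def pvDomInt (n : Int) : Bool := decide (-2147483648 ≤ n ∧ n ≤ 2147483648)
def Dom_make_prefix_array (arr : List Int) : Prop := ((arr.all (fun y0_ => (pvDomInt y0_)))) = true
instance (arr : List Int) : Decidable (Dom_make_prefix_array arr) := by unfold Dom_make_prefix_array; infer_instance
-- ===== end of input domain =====

-- B replaces A's single conditional-append scan by a divide-and-conquer: solve each half,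
-- then append the right half's list OR-ed with the left half's total, compressed; objective: alternative.

-- ===== PORT A =====
-- A: single loop with state (s, newArray), appending s|num only when it differs from s.
def make_prefix_array (arr : List Int) : List Int :=
  (arr.foldl
    (fun (p : Int × List Int) num =>
      if Int.lor p.1 num ≠ p.1 then (Int.lor p.1 num, p.2 ++ [Int.lor p.1 num]) else p)
    ((0 : Int), [(0 : Int)])).2

-- ===== PORT B =====
-- the merge loop of Source B: for v in right: c = t|v; if c != out[-1]: out.append(c)
-- (the state `last` carries out[-1]; out[-1] is always the last value appended)
def pvMerge (t : Int) : List Int → Int → List Int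
  | [], _ => []
  | v :: vs, last =>
    if Int.lor t v ≠ last then Int.lor t v :: pvMerge t vs (Int.lor t v)
    else pvMerge t vs last

def pvSolve (seg : List Int) : List Int :=
  if _h : seg.length ≤ 1 then
    match seg with
    | [] => [0]
    | x :: _ => if x ≠ 0 then [0, x] else [0]
  else
    let mid := seg.length / 2
    let left := pvSolve (seg.take mid)
    let right := pvSolve (seg.drop mid)
    -- left[-1]; left is never empty (it always starts with 0)
    let t := left.getLastD 0
    left ++ pvMerge t right t
termination_by seg.length
decreasing_by
  · simp; omega
  · simp; omega

def make_prefix_array_alt (arr : List Int) : List Int := pvSolve arr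

-- ===== PRECONDITION & SPEC =====
def Spec_make_prefix_array (arr : List Int) (out : List Int) : Prop := out = make_prefix_array_alt arr
instance (arr : List Int) (out : List Int) : Decidable (Spec_make_prefix_array arr out) := by unfold Spec_make_prefix_array; infer_instance

-- ===== CLAIM (what is proved, stated in full; the proofs are below) =====
def Claim_equal_make_prefix_array : Prop := ∀ (arr : List Int), Dom_make_prefix_array arr → Spec_make_prefix_array arr (make_prefix_array arr)

-- ===== LEMMAS AND PROOFS =====


-- Mathlib has no associativity lemma for Int.lor; derive one via bitwise extensionality.
theorem pvInt_eq_of_testBit_eq (a b : Int) (h : ∀ k, a.testBit k = b.testBit k) : a = b := by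
  cases a with
  | ofNat m =>
    cases b with
    | ofNat n =>
      have : m = n := Nat.eq_of_testBit_eq (by intro k; simpa [Int.testBit] using h k)
      rw [this]
    | negSucc n =>
      exfalso
      have hk := h (max m n)
      have hm : Nat.testBit m (max m n) = false :=
        Nat.testBit_eq_false_of_lt (lt_of_lt_of_le (Nat.lt_two_pow_self)
          (Nat.pow_le_pow_right (by norm_num) (le_max_left m n)))
      have hn : Nat.testBit n (max m n) = false :=
        Nat.testBit_eq_false_of_lt (lt_of_lt_of_le (Nat.lt_two_pow_self)
          (Nat.pow_le_pow_right (by norm_num) (le_max_right m n)))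
      simp [Int.testBit, hm, hn] at hk
  | negSucc m =>
    cases b with
    | ofNat n =>
      exfalso
      have hk := h (max m n)
      have hm : Nat.testBit m (max m n) = false :=
        Nat.testBit_eq_false_of_lt (lt_of_lt_of_le (Nat.lt_two_pow_self)
          (Nat.pow_le_pow_right (by norm_num) (le_max_left m n)))
      have hn : Nat.testBit n (max m n) = false :=
        Nat.testBit_eq_false_of_lt (lt_of_lt_of_le (Nat.lt_two_pow_self)
          (Nat.pow_le_pow_right (by norm_num) (le_max_right m n)))
      simp [Int.testBit, hm, hn] at hk
    | negSucc n =>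
      have : m = n := Nat.eq_of_testBit_eq (by
        intro k
        have := h k
        simpa [Int.testBit] using this)
      rw [this]

theorem pvLor_assoc (a b c : Int) :
    Int.lor (Int.lor a b) c = Int.lor a (Int.lor b c) := by
  apply pvInt_eq_of_testBit_eq
  intro k
  simp [Int.testBit_lor, Bool.or_assoc]

theorem pvZero_lor (a : Int) : Int.lor 0 a = a := by
  apply pvInt_eq_of_testBit_eq
  intro k
  have h0 : Int.testBit 0 k = false := by simp [Int.testBit]
  simp [Int.testBit_lor, h0]

theorem pvLor_zero (a : Int) : Int.lor a 0 = a := by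
  apply pvInt_eq_of_testBit_eq
  intro k
  have h0 : Int.testBit 0 k = false := by simp [Int.testBit]
  simp [Int.testBit_lor, h0]

-- the values A's loop appends after starting from state s
def pvTailOut (s : Int) : List Int → List Int
  | [] => []
  | n :: t => if Int.lor s n ≠ s then Int.lor s n :: pvTailOut (Int.lor s n) t else pvTailOut s t

theorem foldl_eq_tailOut (arr : List Int) (s : Int) (acc : List Int) :
    (arr.foldl
      (fun (p : Int × List Int) num =>
        if Int.lor p.1 num ≠ p.1 then (Int.lor p.1 num, p.2 ++ [Int.lor p.1 num]) else p)
      (s, acc)).2 = acc ++ pvTailOut s arr := by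
  induction arr generalizing s acc with
  | nil => simp [pvTailOut]
  | cons n t ih =>
    rw [List.foldl_cons]
    show (t.foldl _ (if Int.lor s n ≠ s then (Int.lor s n, acc ++ [Int.lor s n]) else (s, acc))).2
        = acc ++ pvTailOut s (n :: t)
    unfold pvTailOut
    by_cases h : Int.lor s n = s
    · rw [if_neg (not_not_intro h), if_neg (not_not_intro h)]
      exact ih s acc
    · rw [if_pos h, if_pos h, ih]
      simp

theorem tailOut_append (xs ys : List Int) (s : Int) :
    pvTailOut s (xs ++ ys) = pvTailOut s xs ++ pvTailOut (xs.foldl Int.lor s) ys := by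
  induction xs generalizing s with
  | nil => simp [pvTailOut]
  | cons n t ih =>
    simp only [List.cons_append, pvTailOut, List.foldl_cons]
    by_cases h : Int.lor s n = s
    · rw [if_neg (not_not_intro h), if_neg (not_not_intro h), h, ih]
    · rw [if_pos h, if_pos h, ih]
      simp

theorem getLastD_tailOut (xs : List Int) (s d : Int) :
    (s :: pvTailOut s xs).getLastD d = xs.foldl Int.lor s := by
  induction xs generalizing s d with
  | nil => simp [pvTailOut]
  | cons n t ih =>
    simp only [pvTailOut, List.foldl_cons]
    by_cases h : Int.lor s n = s
    · rw [if_neg (not_not_intro h), h, ih]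
    · rw [if_pos h, List.getLastD_cons, ih]

theorem merge_tailOut (t : Int) (ys : List Int) : ∀ (s : Int),
    pvMerge t (pvTailOut s ys) (Int.lor t s) = pvTailOut (Int.lor t s) ys := by
  induction ys with
  | nil => intro s; simp [pvTailOut, pvMerge]
  | cons n u ih =>
    intro s
    simp only [pvTailOut]
    by_cases h : Int.lor s n = s
    · have h2 : Int.lor (Int.lor t s) n = Int.lor t s := by rw [pvLor_assoc, h]
      rw [if_neg (not_not_intro h), if_neg (not_not_intro h2)]
      exact ih s
    · have key : Int.lor t (Int.lor s n) = Int.lor (Int.lor t s) n := (pvLor_assoc t s n).symm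
      rw [if_pos h]
      simp only [pvMerge, key]
      have ihn := ih (Int.lor s n)
      rw [key] at ihn
      by_cases h2 : Int.lor (Int.lor t s) n = Int.lor t s
      · rw [if_neg (not_not_intro h2), if_neg (not_not_intro h2), ← h2, ihn, h2]
      · rw [if_pos h2, if_pos h2, ihn]

theorem solve_eq : ∀ (N : Nat) (seg : List Int), seg.length ≤ N →
    pvSolve seg = 0 :: pvTailOut 0 seg := by
  intro N
  induction N with
  | zero =>
    intro seg h
    have : seg = [] := List.length_eq_zero_iff.mp (Nat.le_zero.mp h)
    subst this
    rw [pvSolve]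
    simp [pvTailOut]
  | succ N ih =>
    intro seg h
    rw [pvSolve]
    by_cases h1 : seg.length ≤ 1
    · rw [dif_pos h1]
      match seg, h1 with
      | [], _ => simp [pvTailOut]
      | [x], _ =>
        simp only [pvTailOut, pvZero_lor]
        by_cases hx : x = 0
        · simp [hx]
        · simp [hx]
    · rw [dif_neg h1]
      have hlen : 2 ≤ seg.length := by omega
      have hmid1 : 1 ≤ seg.length / 2 := by omega
      have hmid2 : seg.length / 2 < seg.length := by omega
      have hl : (seg.take (seg.length / 2)).length ≤ N := by
        rw [List.length_take]; omega
      have hr : (seg.drop (seg.length / 2)).length ≤ N := by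
        rw [List.length_drop]; omega
      simp only [ih _ hl, ih _ hr, getLastD_tailOut]
      set xs := seg.take (seg.length / 2) with hxs
      set ys := seg.drop (seg.length / 2) with hys
      set t := xs.foldl Int.lor 0 with ht
      have hm : pvMerge t (0 :: pvTailOut 0 ys) t = pvTailOut t ys := by
        have h0 : Int.lor t 0 = t := pvLor_zero t
        simp only [pvMerge, h0, if_neg (not_not_intro rfl)]
        have := merge_tailOut t ys 0
        rw [h0] at this
        exact this
      rw [hm]
      have hsplit : xs ++ ys = seg := List.take_append_drop _ seg
      calc (0 :: pvTailOut 0 xs) ++ pvTailOut t ys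
          = 0 :: (pvTailOut 0 xs ++ pvTailOut (xs.foldl Int.lor 0) ys) := by rw [ht]; rfl
        _ = 0 :: pvTailOut 0 (xs ++ ys) := by rw [tailOut_append]
        _ = 0 :: pvTailOut 0 seg := by rw [hsplit]

-- ===== VERDICT (by name: the statement is the Claim_ definition above) =====
theorem make_prefix_array_spec : Claim_equal_make_prefix_array := by
  intro arr _
  unfold Spec_make_prefix_array make_prefix_array make_prefix_array_alt
  rw [foldl_eq_tailOut, solve_eq arr.length arr le_rfl]
  rfl
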